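-- pv_equiv track=rewrite | github.com/phillegard/ArcGIS_Maintenance | src/server_portal/PortalSharingAudit.py | categorize_by_access
-- ===== SOURCE A (Python) =====
-- def categorize_by_access(items):
--     """Categorize items by their sharing level.
--
--     Args:
--         items: List of item dicts
--
--     Returns:
--         Dict with 'public', 'org', 'shared', 'private' lists
--     """
--     categories = {
--         'public': [],
--         'org': [],
--         'shared': [],
--         'private': []
--     }
--
--     for item in items:
--         access = item.get('access', 'private').lower()
--         if access == 'public':
--             categories['public'].append(item)
--         elif access == 'org':
--             categories['org'].append(item)
--         elif access == 'shared':
--             categories['shared'].append(item)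
--         else:
--             categories['private'].append(item)
--
--     return categories
-- ===== SOURCE B (Python) =====
-- def categorize_by_access(items):
--     """Categorize items by their sharing level.
--
--     Args:
--         items: List of item dicts
--
--     Returns:
--         Dict with 'public', 'org', 'shared', 'private' lists
--     """
--     def norm(item):
--         return item.get('access', 'private').lower()
--
--     return {
--         'public': [i for i in items if norm(i) == 'public'],
--         'org': [i for i in items if norm(i) == 'org'],
--         'shared': [i for i in items if norm(i) == 'shared'],
--         'private': [i for i in items if norm(i) not in ('public', 'org', 'shared')],
--     }
-- ===== Notes on version B (the rewrite author's own statement) =====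
-- stated objective: alternative
-- what changed: Replaces the single bucketing loop with an if-elif chain appending into a pre-built dict by four independent list-comprehension filters over items, one per access category.
import Mathlib
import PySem

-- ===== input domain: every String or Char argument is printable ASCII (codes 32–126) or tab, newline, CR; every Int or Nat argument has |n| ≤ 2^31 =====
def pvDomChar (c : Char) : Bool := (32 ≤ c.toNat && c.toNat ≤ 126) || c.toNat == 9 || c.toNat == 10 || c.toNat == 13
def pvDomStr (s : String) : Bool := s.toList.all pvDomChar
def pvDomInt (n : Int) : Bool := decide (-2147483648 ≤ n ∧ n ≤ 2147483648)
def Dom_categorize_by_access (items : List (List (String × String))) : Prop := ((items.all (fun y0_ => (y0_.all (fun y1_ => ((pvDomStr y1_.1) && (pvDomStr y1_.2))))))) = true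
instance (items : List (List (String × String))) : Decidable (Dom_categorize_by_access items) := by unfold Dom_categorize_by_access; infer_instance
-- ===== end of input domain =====

-- One honest line: B builds each of the four buckets with its own filtering pass instead of A's single loop with an if-elif chain (alternative decomposition, same cost and same values).

-- ===== PORT A =====
-- A's single loop: fold over items carrying the four category lists, appending by the if-elif chain.
def categorize_by_access (items : List (List (String × String))) : List (String × List (List (String × String))) :=
  let cats :=
    items.foldl
      (fun (c : List (List (String × String)) × List (List (String × String)) × List (List (String × String)) × List (List (String × String))) item =>
        let access := PySem.Str.lower ((PySem.Dict.mk item).getD "access" "private")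
        if access = "public" then (c.1 ++ [item], c.2.1, c.2.2.1, c.2.2.2)
        else if access = "org" then (c.1, c.2.1 ++ [item], c.2.2.1, c.2.2.2)
        else if access = "shared" then (c.1, c.2.1, c.2.2.1 ++ [item], c.2.2.2)
        else (c.1, c.2.1, c.2.2.1, c.2.2.2 ++ [item]))
      ([], [], [], [])
  [("public", cats.1), ("org", cats.2.1), ("shared", cats.2.2.1), ("private", cats.2.2.2)]

-- ===== PORT B =====
-- B's helper norm(item)
def pvNorm (item : List (String × String)) : String :=
  PySem.Str.lower ((PySem.Dict.mk item).getD "access" "private")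

def categorize_by_access_alt (items : List (List (String × String))) : List (String × List (List (String × String))) :=
  [("public", items.filter (fun i => pvNorm i = "public")),
   ("org", items.filter (fun i => pvNorm i = "org")),
   ("shared", items.filter (fun i => pvNorm i = "shared")),
   ("private", items.filter (fun i => pvNorm i ∉ (["public", "org", "shared"] : List String)))]

-- ===== PRECONDITION & SPEC =====
def Spec_categorize_by_access (items : List (List (String × String))) (out : List (String × List (List (String × String)))) : Prop := out = categorize_by_access_alt items
instance (items : List (List (String × String))) (out : List (String × List (List (String × String)))) : Decidable (Spec_categorize_by_access items out) := by unfold Spec_categorize_by_access; infer_instance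

-- ===== CLAIM (what is proved, stated in full; the proofs are below) =====
def Claim_equal_categorize_by_access : Prop := ∀ (items : List (List (String × String))), Dom_categorize_by_access items → Spec_categorize_by_access items (categorize_by_access items)

-- ===== LEMMAS AND PROOFS =====
theorem categorize_fold_eq (items : List (List (String × String)))
    (p o s pr : List (List (String × String))) :
    items.foldl
      (fun (c : List (List (String × String)) × List (List (String × String)) × List (List (String × String)) × List (List (String × String))) item =>
        let access := PySem.Str.lower ((PySem.Dict.mk item).getD "access" "private")
        if access = "public" then (c.1 ++ [item], c.2.1, c.2.2.1, c.2.2.2)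
        else if access = "org" then (c.1, c.2.1 ++ [item], c.2.2.1, c.2.2.2)
        else if access = "shared" then (c.1, c.2.1, c.2.2.1 ++ [item], c.2.2.2)
        else (c.1, c.2.1, c.2.2.1, c.2.2.2 ++ [item]))
      (p, o, s, pr)
    = (p ++ items.filter (fun i => pvNorm i = "public"),
       o ++ items.filter (fun i => pvNorm i = "org"),
       s ++ items.filter (fun i => pvNorm i = "shared"),
       pr ++ items.filter (fun i => pvNorm i ∉ (["public", "org", "shared"] : List String))) := by
  induction items generalizing p o s pr with
  | nil => simp
  | cons hd tl ih =>
    simp only [List.foldl_cons, List.filter_cons]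
    by_cases h1 : pvNorm hd = "public"
    · simp [pvNorm] at h1
      simp [h1, ih, pvNorm]
    · by_cases h2 : pvNorm hd = "org"
      · simp [pvNorm] at h1 h2
        simp [h2, ih, pvNorm]
      · by_cases h3 : pvNorm hd = "shared"
        · simp [pvNorm] at h1 h2 h3
          simp [h3, ih, pvNorm]
        · simp [pvNorm] at h1 h2 h3
          simp [h1, h2, h3, ih, pvNorm]

-- ===== VERDICT (by name: the statement is the Claim_ definition above) =====
theorem categorize_by_access_spec : Claim_equal_categorize_by_access := by
  intro items _
  unfold Spec_categorize_by_access categorize_by_access categorize_by_access_alt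
  simp only [categorize_fold_eq, List.nil_append]
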